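-- pv_equiv track=rewrite | github.com/samhung1205/Ship-Detection-Data-Engine | sdde/statistics.py | _class_x_size_table
-- ===== SOURCE A (Python) =====
-- from collections import Counter
-- from typing import Any, Dict, List, Mapping, Sequence
--
-- def _class_x_size_table(
--     counter: Counter[str],
-- ) -> Dict[str, Dict[str, int]]:
--     """Convert 'cls|size_tag' counter to nested {cls: {size_tag: count}}."""
--     table: Dict[str, Dict[str, int]] = {}
--     for key, cnt in counter.items():
--         cls, st = key.split("|", 1)
--         table.setdefault(cls, {})
--         table[cls][st] = cnt
--     return table
-- ===== SOURCE B (Python) =====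
-- def _class_x_size_table(counter):
--     """Convert 'cls|size_tag' counter to nested {cls: {size_tag: count}}."""
--     parts = [(key.split("|", 1), cnt) for key, cnt in counter.items()]
--     classes = list(dict.fromkeys(cls for (cls, _st), _cnt in parts))
--     return {cls: {st: cnt for (c, st), cnt in parts if c == cls}
--             for cls in classes}
-- ===== Notes on version B (the rewrite author's own statement) =====
-- stated objective: alternative
-- what changed: B replaces A's incremental setdefault single pass with a group-first decomposition: split all keys once, dedup the class prefixes in first-appearance order, then build each class's inner dict by a filtered scan over the split items.
import Mathlib
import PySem

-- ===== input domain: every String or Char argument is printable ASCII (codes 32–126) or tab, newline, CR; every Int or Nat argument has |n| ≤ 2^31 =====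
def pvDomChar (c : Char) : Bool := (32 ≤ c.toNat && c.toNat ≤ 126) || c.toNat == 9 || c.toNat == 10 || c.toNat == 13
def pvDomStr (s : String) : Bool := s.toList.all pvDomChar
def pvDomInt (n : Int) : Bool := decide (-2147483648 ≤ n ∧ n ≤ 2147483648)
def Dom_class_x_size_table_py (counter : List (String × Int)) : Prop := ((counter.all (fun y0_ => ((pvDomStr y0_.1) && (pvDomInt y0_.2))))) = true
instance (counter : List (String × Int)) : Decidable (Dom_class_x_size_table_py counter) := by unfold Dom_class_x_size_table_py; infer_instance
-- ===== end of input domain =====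

-- B builds the same nested table group-first (dedup class prefixes, then one filtered scan per class) instead of A's incremental setdefault pass; alternative decomposition, same result.


-- ===== PORT A =====
-- both Pythons compute `key.split("|", 1)`: exact when '|' occurs in the key (guaranteed by Pre_)
def pvSplitBar (k : String) : String × String :=
  (String.ofList (k.toList.takeWhile (· ≠ '|')), String.ofList ((k.toList.dropWhile (· ≠ '|')).drop 1))

-- the body of A's for-loop: table.setdefault(cls, {}), then table[cls][st] = cnt (in-place update of the inner dict)
def pvStepA (table : PySem.Dict String (PySem.Dict String Int)) (kv : String × Int) :
    PySem.Dict String (PySem.Dict String Int) :=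
  let cs := pvSplitBar kv.1
  let table1 := table.setdefault cs.1 PySem.Dict.empty
  table1.modify cs.1 PySem.Dict.empty (fun inner => inner.insert cs.2 kv.2)

def class_x_size_table_py (counter : List (String × Int)) : List (String × List (String × Int)) :=
  ((counter.foldl pvStepA PySem.Dict.empty).items).map (fun p => (p.1, p.2.items))

-- ===== PORT B =====
-- parts = [(key.split("|", 1), cnt) for key, cnt in counter.items()]
def pvParts (counter : List (String × Int)) : List ((String × String) × Int) :=
  counter.map (fun kv => (pvSplitBar kv.1, kv.2))

-- the inner dict comprehension {st: cnt for (c, st), cnt in parts if c == cls}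
def pvInner (parts : List ((String × String) × Int)) (c : String) : PySem.Dict String Int :=
  (parts.filter (fun p => p.1.1 == c)).foldl (fun d p => PySem.Dict.insert d p.1.2 p.2) PySem.Dict.empty

def class_x_size_table_py_alt (counter : List (String × Int)) : List (String × List (String × Int)) :=
  let parts := pvParts counter
  let classes := PySem.List.dedup (parts.map (fun p => p.1.1))   -- list(dict.fromkeys(…))
  -- outer dict comprehension: `classes` is duplicate-free and in first-appearance order,
  -- so the comprehension is exactly this map
  classes.map (fun c => (c, (pvInner parts c).items))

-- ===== PRECONDITION & SPEC =====
-- Pre_ excludes (a) keys without '|', on which A raises ValueError, and (b) lists with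
-- duplicate keys, which no real Counter produces and whose association-list reading is ambiguous.
def Pre_class_x_size_table_py (counter : List (String × Int)) : Prop :=
  counter.Pairwise (fun a b => a.1 ≠ b.1) ∧ ∀ kv ∈ counter, '|' ∈ kv.1.toList
instance (counter : List (String × Int)) : Decidable (Pre_class_x_size_table_py counter) := by unfold Pre_class_x_size_table_py; infer_instance

def pvWitness_class_x_size_table_py : (List (String × Int)) :=
  [("boat|small", 2), ("boat|large", 1), ("car|small", 3)]

def Spec_class_x_size_table_py (counter : List (String × Int)) (out : List (String × List (String × Int))) : Prop := out = class_x_size_table_py_alt counter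
instance (counter : List (String × Int)) (out : List (String × List (String × Int))) : Decidable (Spec_class_x_size_table_py counter out) := by unfold Spec_class_x_size_table_py; infer_instance

-- ===== CLAIM (what is proved, stated in full; the proofs are below) =====
def Claim_equal_class_x_size_table_py : Prop := ∀ (counter : List (String × Int)), Dom_class_x_size_table_py counter → Pre_class_x_size_table_py counter → Spec_class_x_size_table_py counter (class_x_size_table_py counter)

-- ===== LEMMAS AND PROOFS =====

-- class prefix of one (key, cnt) item
def pvCls (kv : String × Int) : String := (pvSplitBar kv.1).1

lemma pvParts_append (l : List (String × Int)) (x : String × Int) :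
    pvParts (l ++ [x]) = pvParts l ++ [(pvSplitBar x.1, x.2)] := by
  simp [pvParts]

lemma pvInner_append (l : List (String × Int)) (x : String × Int) (c : String) :
    pvInner (pvParts (l ++ [x])) c =
      if (pvSplitBar x.1).1 = c then
        (pvInner (pvParts l) c).insert (pvSplitBar x.1).2 x.2
      else pvInner (pvParts l) c := by
  by_cases h : (pvSplitBar x.1).1 = c <;>
    simp [pvInner, pvParts_append, List.filter_append, h]

-- the keys of A's table are the distinct class prefixes, in first-appearance order
lemma keysT (l : List (String × Int)) :
    (l.foldl pvStepA PySem.Dict.empty).keys = PySem.Set.ofList (l.map pvCls) := by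
  induction l using List.reverseRecOn with
  | nil => simp [PySem.Dict.keys_empty, PySem.Set.ofList_nil]
  | append_singleton l x ih =>
      rw [List.foldl_append, List.foldl_cons, List.foldl_nil]
      rw [List.map_append, List.map_cons, List.map_nil, PySem.Set.ofList_append_singleton]
      show (((l.foldl pvStepA PySem.Dict.empty).setdefault (pvSplitBar x.1).1 PySem.Dict.empty).modify
              (pvSplitBar x.1).1 PySem.Dict.empty (fun inner => inner.insert (pvSplitBar x.1).2 x.2)).keys = _
      rw [PySem.Dict.keys_modify,
          PySem.Dict.keys_insert_of_contains _ _ (by simp [PySem.Dict.contains_setdefault]),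
          PySem.Dict.keys_setdefault, ih,
          PySem.Dict.contains_eq_decide_mem_keys, ih]
      by_cases hm : pvCls x ∈ PySem.Set.ofList (l.map pvCls)
      · rw [if_pos (by simpa [pvCls] using hm), PySem.Set.add,
            if_pos (by simpa [PySem.Set.contains, List.contains_eq_mem, pvCls] using hm)]
      · rw [if_neg (by simpa [pvCls] using hm), PySem.Set.add,
            if_neg (by simpa [PySem.Set.contains, List.contains_eq_mem, pvCls] using hm)]
        rfl

-- the value A's table holds at any class c is B's inner dict for c
lemma getDT (l : List (String × Int)) (c : String) :
    (l.foldl pvStepA PySem.Dict.empty).getD c PySem.Dict.empty = pvInner (pvParts l) c := by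
  induction l using List.reverseRecOn with
  | nil => simp [pvInner, pvParts, PySem.Dict.getD_empty]
  | append_singleton l x ih =>
      rw [List.foldl_append, List.foldl_cons, List.foldl_nil, pvInner_append]
      show (((l.foldl pvStepA PySem.Dict.empty).setdefault (pvSplitBar x.1).1 PySem.Dict.empty).modify
              (pvSplitBar x.1).1 PySem.Dict.empty (fun inner => inner.insert (pvSplitBar x.1).2 x.2)).getD
              c PySem.Dict.empty = _
      rw [PySem.Dict.getD_modify]
      by_cases h : c = (pvSplitBar x.1).1
      · subst h
        rw [if_pos rfl, if_pos rfl, PySem.Dict.getD_setdefault_self, ih]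
      · have hs : ((l.foldl pvStepA PySem.Dict.empty).setdefault (pvSplitBar x.1).1
            PySem.Dict.empty).getD c PySem.Dict.empty
            = (l.foldl pvStepA PySem.Dict.empty).getD c PySem.Dict.empty := by
          show (_root_.PySem.Dict.get? _ c).getD _ = (_root_.PySem.Dict.get? _ c).getD _
          rw [PySem.Dict.get?_setdefault_of_ne _ _ h]
        rw [if_neg h, if_neg (fun hh => h hh.symm), hs, ih]

-- ===== VERDICT (by name: the statement is the Claim_ definition above) =====
theorem class_x_size_table_py_spec : Claim_equal_class_x_size_table_py := by
  intro counter _ _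
  unfold Spec_class_x_size_table_py
  simp only [class_x_size_table_py, class_x_size_table_py_alt]
  have hnd : (counter.foldl pvStepA PySem.Dict.empty).keys.Nodup := by
    rw [keysT]; exact PySem.Set.nodup_ofList _
  rw [PySem.Dict.items_eq_map_keys _ hnd PySem.Dict.empty, keysT,
      PySem.List.dedup_eq_ofList, List.map_map]
  have hcls : (pvParts counter).map (fun p => p.1.1) = counter.map pvCls := by
    simp [pvParts, pvCls, Function.comp_def]
  rw [hcls]
  refine List.map_congr_left (fun c hc => ?_)
  simp [getDT, pvParts]
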